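-- pv_equiv track=rewrite | github.com/PINTO0309/onnx2tf | onnx2tf/tflite_builder/op_builders/shared.py | _is_inverse_perm
-- ===== SOURCE A (Python) =====
-- from typing import Any, List, Optional
--
-- def _is_inverse_perm(perm_a: List[int], perm_b: List[int]) -> bool:
--     if len(perm_a) != len(perm_b):
--         return False
--     rank = len(perm_a)
--     if sorted(perm_a) != [int(i) for i in range(rank)]:
--         return False
--     if sorted(perm_b) != [int(i) for i in range(rank)]:
--         return False
--     for idx, value in enumerate(perm_a):
--         if perm_b[value] != idx:
--             return False
--     return True
-- ===== SOURCE B (Python) =====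
-- def _is_inverse_perm(perm_a, perm_b):
--     rank = len(perm_a)
--     if len(perm_b) != rank:
--         return False
--     inv = [None] * rank
--     for idx, value in enumerate(perm_a):
--         if value < 0 or value >= rank or inv[value] is not None:
--             return False
--         inv[value] = idx
--     return perm_b == inv
-- ===== Notes on version B (the rewrite author's own statement) =====
-- stated objective: faster
-- what changed: Replaces A's two sorts (validating each list against range(rank)) and element-wise composition loop by a single O(n) pass that builds the inverse permutation table while simultaneously validating perm_a (range + no duplicates via the table slots), followed by one whole-list comparison with perm_b.
import Mathlib
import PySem

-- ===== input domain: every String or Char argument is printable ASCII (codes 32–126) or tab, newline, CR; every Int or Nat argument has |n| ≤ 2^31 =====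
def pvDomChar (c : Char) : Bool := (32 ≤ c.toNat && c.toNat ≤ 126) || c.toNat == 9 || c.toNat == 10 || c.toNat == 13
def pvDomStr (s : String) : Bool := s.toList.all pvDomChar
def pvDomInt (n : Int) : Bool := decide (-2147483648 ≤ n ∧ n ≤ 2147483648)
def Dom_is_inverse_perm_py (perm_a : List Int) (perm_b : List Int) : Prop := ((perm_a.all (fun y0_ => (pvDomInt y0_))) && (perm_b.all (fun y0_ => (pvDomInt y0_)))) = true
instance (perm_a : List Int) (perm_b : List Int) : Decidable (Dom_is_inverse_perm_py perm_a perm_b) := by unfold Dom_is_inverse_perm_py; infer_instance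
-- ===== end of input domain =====

-- B replaces A's two sorts and element-wise composition loop by one pass that builds the
-- inverse permutation table (validating perm_a on the way) and a single whole-list comparison.

-- ===== PORT A =====
-- 'for idx, value in enumerate(perm_a): if perm_b[value] != idx: return False'
-- (the pyGet? none branch is Python's IndexError; unreachable under the sorted(perm_b) == range guard)
def pvChkLoop (perm_b : List Int) : List (Int × Int) → Bool
  | [] => true
  | (idx, value) :: rest =>
    match PySem.List.pyGet? perm_b value with
    | some x => if x ≠ idx then false else pvChkLoop perm_b rest
    | none => false

def is_inverse_perm_py (perm_a : List Int) (perm_b : List Int) : Bool :=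
  if (perm_a.length : Int) ≠ (perm_b.length : Int) then false
  else
    let rank : Int := perm_a.length
    if PySem.List.sorted perm_a (fun x => x) false ≠ PySem.List.pyRange 0 rank 1 then false
    else if PySem.List.sorted perm_b (fun x => x) false ≠ PySem.List.pyRange 0 rank 1 then false
    else pvChkLoop perm_b (PySem.List.enumerate perm_a)

-- ===== PORT B =====
-- 'for idx, value in enumerate(perm_a): if value < 0 or value >= rank or inv[value] is not None:
--    return False; inv[value] = idx'   (none = the early 'return False')
def pvInvLoop (rank : Int) : List (Int × Int) → List (Option Int) → Option (List (Option Int))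
  | [], inv => some inv
  | (idx, value) :: rest, inv =>
    if value < 0 || rank ≤ value then none
    else
      match PySem.List.pyGet? inv value with
      | some none => pvInvLoop rank rest (inv.set value.toNat (some idx))
      | _ => none

def is_inverse_perm_py_alt (perm_a : List Int) (perm_b : List Int) : Bool :=
  let rank := perm_a.length
  if (perm_b.length : Int) ≠ (rank : Int) then false
  else
    match pvInvLoop (rank : Int) (PySem.List.enumerate perm_a) (List.replicate rank none) with
    | none => false
    | some inv => perm_b.map some == inv

-- ===== PRECONDITION & SPEC =====
def Spec_is_inverse_perm_py (perm_a : List Int) (perm_b : List Int) (out : Bool) : Prop := out = is_inverse_perm_py_alt perm_a perm_b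
instance (perm_a : List Int) (perm_b : List Int) (out : Bool) : Decidable (Spec_is_inverse_perm_py perm_a perm_b out) := by unfold Spec_is_inverse_perm_py; infer_instance

-- ===== CLAIM (what is proved, stated in full; the proofs are below) =====
def Claim_equal_is_inverse_perm_py : Prop := ∀ (perm_a : List Int) (perm_b : List Int), Dom_is_inverse_perm_py perm_a perm_b → Spec_is_inverse_perm_py perm_a perm_b (is_inverse_perm_py perm_a perm_b)

-- ===== LEMMAS AND PROOFS =====

theorem pv_sorted_eq_range_iff (xs : List Int) (m : Int) :
    PySem.List.sorted xs (fun x => x) false = PySem.List.pyRange 0 m 1 ↔ xs.Perm (PySem.List.pyRange 0 m 1) := by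
  constructor
  · intro h
    exact h ▸ (PySem.List.sorted_perm xs (fun x => x) false).symm
  · intro h
    exact PySem.List.sorted_eq_of_perm_of_pairwise_lt xs (PySem.List.pyRange 0 m 1) (fun x => x)
      h.symm (by simpa using PySem.List.pairwise_lt_pyRange_one 0 m)

theorem pvGet_nonneg (inv : List (Option Int)) (v : Int) (h0 : 0 ≤ v) :
    PySem.List.pyGet? inv v = inv[v.toNat]? := by
  obtain ⟨n, rfl⟩ := Int.eq_ofNat_of_zero_le h0
  simp [PySem.List.pyGet?_natCast]

theorem pvGetInt_nonneg (b : List Int) (v : Int) (h0 : 0 ≤ v) :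
    PySem.List.pyGet? b v = b[v.toNat]? := by
  obtain ⟨n, rfl⟩ := Int.eq_ofNat_of_zero_le h0
  simp [PySem.List.pyGet?_natCast]

-- the pure-functional effect of B's loop body sequence
def pvApplySets (l : List (Int × Int)) (inv : List (Option Int)) : List (Option Int) :=
  l.foldl (fun inv p => inv.set p.2.toNat (some p.1)) inv

theorem pvApplySets_length (l : List (Int × Int)) (inv : List (Option Int)) :
    (pvApplySets l inv).length = inv.length := by
  induction l generalizing inv with
  | nil => rfl
  | cons p rest ih => simp only [pvApplySets, List.foldl_cons] at ih ⊢; rw [ih, List.length_set]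

-- completeness: under the permutation conditions B's loop succeeds
theorem pvInvLoop_success (rank : Int) (l : List (Int × Int)) (inv : List (Option Int))
    (hr : ∀ p ∈ l, 0 ≤ p.2 ∧ p.2 < rank)
    (hn : (l.map (fun p => p.2.toNat)).Nodup)
    (hfree : ∀ p ∈ l, inv[p.2.toNat]? = some none) :
    pvInvLoop rank l inv = some (pvApplySets l inv) := by
  induction l generalizing inv with
  | nil => rfl
  | cons p rest ih =>
    obtain ⟨idx, value⟩ := p
    have h0 := (hr _ (List.mem_cons_self ..)).1
    have h1 := (hr _ (List.mem_cons_self ..)).2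
    have hfree0 := hfree _ (List.mem_cons_self ..)
    simp only at h0 h1 hfree0
    simp only [pvInvLoop]
    rw [if_neg (by simp; omega), pvGet_nonneg inv value h0, hfree0]
    simp only [List.map_cons, List.nodup_cons] at hn
    rw [ih _ (fun q hq => hr q (List.mem_cons_of_mem _ hq)) hn.2]
    · rfl
    · intro q hq
      rw [List.getElem?_set_ne]
      · exact hfree _ (List.mem_cons_of_mem _ hq)
      · intro hEq
        exact hn.1 (hEq ▸ List.mem_map_of_mem hq)

-- soundness helper: success means every processed slot was still free at entry
theorem pvInvLoop_free (rank : Int) (l : List (Int × Int)) (inv inv' : List (Option Int))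
    (h : pvInvLoop rank l inv = some inv') : ∀ p ∈ l, inv[p.2.toNat]? = some none := by
  induction l generalizing inv with
  | nil => intro p hp; cases hp
  | cons q rest ih =>
    obtain ⟨idx, value⟩ := q
    intro p hp
    simp only [pvInvLoop] at h
    by_cases hg : value < 0 || rank ≤ value
    · rw [if_pos hg] at h; cases h
    rw [if_neg hg] at h
    simp only [Bool.or_eq_true, decide_eq_true_eq, not_or, not_lt, not_le] at hg
    rw [pvGet_nonneg inv value hg.1] at h
    rcases hgety : inv[value.toNat]? with _ | o
    · rw [hgety] at h; cases h
    rcases o with _ | x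
    · rw [hgety] at h
      rcases List.mem_cons.1 hp with rfl | hp'
      · simpa using hgety
      · have := ih _ h p hp'
        by_cases he : p.2.toNat = value.toNat
        · rw [he, List.getElem?_set_self] at this
          · cases this
          · exact List.getElem?_eq_some_iff.1 hgety |>.1
        · rwa [List.getElem?_set_ne (fun hc => he hc.symm)] at this
    · rw [hgety] at h; cases h

-- soundness: success forces range bounds, distinct slots, and the functional result
theorem pvInvLoop_sound (rank : Int) (l : List (Int × Int)) (inv inv' : List (Option Int))
    (h : pvInvLoop rank l inv = some inv') :
    (∀ p ∈ l, 0 ≤ p.2 ∧ p.2 < rank) ∧ (l.map (fun p => p.2.toNat)).Nodup ∧ inv' = pvApplySets l inv := by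
  induction l generalizing inv with
  | nil => simp only [pvInvLoop] at h; cases h; exact ⟨by simp, by simp, rfl⟩
  | cons q rest ih =>
    obtain ⟨idx, value⟩ := q
    simp only [pvInvLoop] at h
    by_cases hg : value < 0 || rank ≤ value
    · rw [if_pos hg] at h; cases h
    rw [if_neg hg] at h
    simp only [Bool.or_eq_true, decide_eq_true_eq, not_or, not_lt, not_le] at hg
    rw [pvGet_nonneg inv value hg.1] at h
    rcases hgety : inv[value.toNat]? with _ | o
    · rw [hgety] at h; cases h
    rcases o with _ | x
    swap
    · rw [hgety] at h; cases h
    rw [hgety] at h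
    obtain ⟨hr, hn, hres⟩ := ih _ h
    refine ⟨?_, ?_, ?_⟩
    · intro p hp
      rcases List.mem_cons.1 hp with rfl | hp'
      · exact ⟨hg.1, hg.2⟩
      · exact hr p hp'
    · simp only [List.map_cons, List.nodup_cons]
      refine ⟨?_, hn⟩
      intro hc
      obtain ⟨p, hp, hpe⟩ := List.mem_map.1 hc
      have := pvInvLoop_free rank rest _ _ h p hp
      rw [hpe, List.getElem?_set_self (List.getElem?_eq_some_iff.1 hgety |>.1)] at this
      cases this
    · simpa [pvApplySets] using hres

-- pointwise characterisation of the built table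
theorem pvApplySets_getElem? (l : List (Int × Int)) (inv : List (Option Int))
    (hlt : ∀ p ∈ l, p.2.toNat < inv.length)
    (hn : (l.map (fun p => p.2.toNat)).Nodup) (j : Nat) :
    (pvApplySets l inv)[j]? =
      match l.find? (fun p => p.2.toNat == j) with
      | some p => some (some p.1)
      | none => inv[j]? := by
  induction l generalizing inv with
  | nil => rfl
  | cons q rest ih =>
    simp only [List.map_cons, List.nodup_cons] at hn
    simp only [pvApplySets, List.foldl_cons]
    rw [show (rest.foldl (fun inv p => inv.set p.2.toNat (some p.1)) (inv.set q.2.toNat (some q.1))) = pvApplySets rest (inv.set q.2.toNat (some q.1)) from rfl]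
    rw [ih _ (fun p hp => by rw [List.length_set]; exact hlt p (List.mem_cons_of_mem _ hp)) hn.2]
    by_cases hq : q.2.toNat = j
    · rw [List.find?_cons_of_pos (by simp [hq])]
      have : rest.find? (fun p => p.2.toNat == j) = none := by
        rw [List.find?_eq_none]
        intro p hp
        simp only [beq_iff_eq]
        intro hc
        exact hn.1 ((hq ▸ hc : p.2.toNat = q.2.toNat) ▸ List.mem_map_of_mem hp)
      rw [this, hq, List.getElem?_set_self (hq ▸ hlt q (List.mem_cons_self ..))]
    · rw [List.find?_cons_of_neg (by simp [hq])]
      rcases hf : rest.find? (fun p => p.2.toNat == j) with _ | p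
      · simp only [hf]; rw [List.getElem?_set_ne hq]
      · simp only [hf]

-- A's check loop is the universal composition condition
theorem pvChkLoop_iff (perm_b : List Int) (l : List (Int × Int)) :
    pvChkLoop perm_b l = true ↔ ∀ p ∈ l, PySem.List.pyGet? perm_b p.2 = some p.1 := by
  induction l with
  | nil => simp [pvChkLoop]
  | cons q rest ih =>
    obtain ⟨idx, value⟩ := q
    simp only [pvChkLoop]
    rcases hg : PySem.List.pyGet? perm_b value with _ | x
    · simp only
      constructor
      · intro h; cases h
      · intro h
        have := h _ (List.mem_cons_self ..)
        simp only at this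
        rw [hg] at this; cases this
    · simp only
      by_cases hx : x = idx
      · subst hx
        rw [if_neg (by simp)]
        rw [ih]
        constructor
        · intro h p hp
          rcases List.mem_cons.1 hp with rfl | hp'
          · simpa using hg
          · exact h p hp'
        · intro h p hp
          exact h p (List.mem_cons_of_mem _ hp)
      · rw [if_pos (by simpa using hx)]
        constructor
        · intro h; cases h
        · intro h
          have := h _ (List.mem_cons_self ..)
          simp only at this
          rw [hg] at this
          exact absurd (Option.some.inj this) hx

-- membership conditions on enumerate perm_a ↔ perm_a is a permutation of range(rank)
theorem pv_conds_of_perm (a : List Int)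
    (hPa : a.Perm (PySem.List.pyRange 0 (a.length : Int) 1)) :
    (∀ p ∈ PySem.List.enumerate a 0, 0 ≤ p.2 ∧ p.2 < (a.length : Int)) ∧
      ((PySem.List.enumerate a 0).map (fun p => p.2.toNat)).Nodup := by
  have hmem : ∀ x ∈ a, 0 ≤ x ∧ x < (a.length : Int) := by
    intro x hx
    exact PySem.List.mem_pyRange_one.1 (hPa.subset hx)
  constructor
  · intro p hp
    obtain ⟨k, hk, rfl⟩ := (PySem.List.mem_enumerate_iff a 0 p).1 hp
    exact hmem _ (List.getElem_mem hk)
  · have h1 : ((PySem.List.enumerate a 0).map (fun p => p.2.toNat)) = a.map Int.toNat := by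
      rw [show (fun p : Int × Int => p.2.toNat) = (Int.toNat ∘ fun p : Int × Int => p.2) from rfl,
        ← List.map_map, PySem.List.map_snd_enumerate]
    rw [h1]
    refine List.Nodup.map_on ?_ (hPa.nodup_iff.2 (PySem.List.nodup_pyRange_one 0 _))
    intro x hx y hy hxy
    have h2 := hmem x hx
    have h3 := hmem y hy
    omega

theorem pv_perm_of_conds (a : List Int)
    (hr : ∀ p ∈ PySem.List.enumerate a 0, 0 ≤ p.2 ∧ p.2 < (a.length : Int))
    (hn : ((PySem.List.enumerate a 0).map (fun p => p.2.toNat)).Nodup) :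
    a.Perm (PySem.List.pyRange 0 (a.length : Int) 1) := by
  have h1 : ((PySem.List.enumerate a 0).map (fun p => p.2.toNat)) = a.map Int.toNat := by
    rw [show (fun p : Int × Int => p.2.toNat) = (Int.toNat ∘ fun p : Int × Int => p.2) from rfl,
      ← List.map_map, PySem.List.map_snd_enumerate]
  rw [h1] at hn
  have hmem : ∀ x ∈ a, 0 ≤ x ∧ x < (a.length : Int) := by
    intro x hx
    obtain ⟨k, hk, hxe⟩ := List.mem_iff_getElem.1 hx
    have := hr ((0 : Int) + (k : Int), a[k]) ((PySem.List.mem_enumerate_iff a 0 _).2 ⟨k, hk, rfl⟩)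
    simpa [hxe] using this
  have hsub : a ⊆ PySem.List.pyRange 0 (a.length : Int) 1 := by
    intro x hx
    exact PySem.List.mem_pyRange_one.2 (hmem x hx)
  have hlen : (PySem.List.pyRange 0 (a.length : Int) 1).length ≤ a.length := by
    rw [PySem.List.length_pyRange_one]; omega
  exact (List.subperm_of_subset (hn.of_map _) hsub).perm_of_length_le hlen

-- ===== VERDICT (by name: the statement is the Claim_ definition above) =====
theorem is_inverse_perm_py_spec : Claim_equal_is_inverse_perm_py := by
  intro a b _
  unfold Spec_is_inverse_perm_py is_inverse_perm_py is_inverse_perm_py_alt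
  by_cases hlen : (a.length : Int) = (b.length : Int)
  swap
  · rw [if_pos hlen, if_pos (fun h => hlen h.symm)]
  rw [if_neg (not_not_intro hlen), if_neg (not_not_intro hlen.symm)]
  have hbl : b.length = a.length := by exact_mod_cast hlen.symm
  rcases hloop : pvInvLoop (a.length : Int) (PySem.List.enumerate a) (List.replicate a.length none) with _ | inv'
  · -- B's loop fails: perm_a is not a permutation of range, so A's first guard fires
    have hsa : PySem.List.sorted a (fun x => x) false ≠ PySem.List.pyRange 0 (a.length : Int) 1 := by
      intro hs
      obtain ⟨hr, hn⟩ := pv_conds_of_perm a ((pv_sorted_eq_range_iff a _).1 hs)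
      rw [pvInvLoop_success _ _ _ hr hn ?_] at hloop
      · cases hloop
      · intro p hp
        have := hr p hp
        rw [List.getElem?_replicate, if_pos (by omega)]
    rw [if_pos hsa]
  · obtain ⟨hr, hn, hres⟩ := pvInvLoop_sound _ _ _ _ hloop
    have hPa := pv_perm_of_conds a hr hn
    have hsa := (pv_sorted_eq_range_iff a _).2 hPa
    rw [if_neg (not_not_intro hsa)]
    show _ = (List.map some b == inv')
    have hlt : ∀ p ∈ PySem.List.enumerate a 0, p.2.toNat < (List.replicate a.length (none : Option Int)).length := by
      intro p hp
      have := hr p hp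
      rw [List.length_replicate]
      omega
    have hinvlen : inv'.length = a.length := by
      rw [hres, pvApplySets_length, List.length_replicate]
    have hiff : (∀ p ∈ PySem.List.enumerate a 0, PySem.List.pyGet? b p.2 = some p.1) ↔ b.map some = inv' := by
      constructor
      · intro hchk
        apply List.ext_getElem?
        intro i
        by_cases hi : i < a.length
        · have hiI : ((i : Int)) ∈ a := hPa.mem_iff.2 (PySem.List.mem_pyRange_one.2 ⟨by omega, by omega⟩)
          obtain ⟨k, hk, hke⟩ := List.mem_iff_getElem.1 hiI
          have hpmem : ((0 : Int) + (k : Int), a[k]) ∈ PySem.List.enumerate a 0 :=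
            (PySem.List.mem_enumerate_iff a 0 _).2 ⟨k, hk, rfl⟩
          have hfs : (List.find? (fun p : Int × Int => p.2.toNat == i) (PySem.List.enumerate a 0)).isSome :=
            List.find?_isSome.2 ⟨_, hpmem, by simp [hke]⟩
          obtain ⟨q, hq⟩ := Option.isSome_iff_exists.1 hfs
          rw [hres, pvApplySets_getElem? _ _ hlt hn i, hq]
          have hqmem := List.mem_of_find?_eq_some hq
          have hqpred : q.2.toNat = i := by simpa using List.find?_some hq
          have hq0 := (hr q hqmem).1
          have := hchk q hqmem
          rw [pvGetInt_nonneg b q.2 hq0, hqpred] at this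
          simp only [List.getElem?_map, this]
          rfl
        · rw [List.getElem?_eq_none (by simpa [hbl] using Nat.le_of_not_lt hi),
            List.getElem?_eq_none (by omega : inv'.length ≤ i)]
      · intro hmain p hp
        have hpr := hr p hp
        have hpi : p.2.toNat < a.length := by omega
        have hfs : (List.find? (fun q : Int × Int => q.2.toNat == p.2.toNat) (PySem.List.enumerate a 0)).isSome :=
          List.find?_isSome.2 ⟨p, hp, by simp⟩
        obtain ⟨q, hq⟩ := Option.isSome_iff_exists.1 hfs
        have hqmem := List.mem_of_find?_eq_some hq
        have hqpred : q.2.toNat = p.2.toNat := by simpa using List.find?_some hq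
        have hqp : q = p := List.inj_on_of_nodup_map hn hqmem hp hqpred
        have hchar : inv'[p.2.toNat]? = some (some p.1) := by
          rw [hres, pvApplySets_getElem? _ _ hlt hn, hq, hqp]
        have := congrArg (fun l => l[p.2.toNat]?) hmain
        simp only [List.getElem?_map, hchar] at this
        rcases hbg : b[p.2.toNat]? with _ | y
        · rw [hbg] at this; cases this
        · rw [hbg] at this
          simp only [Option.map_some] at this
          rw [pvGetInt_nonneg b p.2 hpr.1, hbg, Option.some.inj this]
    by_cases hmain : b.map some = inv'
    · have hchk := hiff.2 hmain
      have hPb : b.Perm (PySem.List.pyRange 0 (a.length : Int) 1) := by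
        have hsub : PySem.List.pyRange 0 (a.length : Int) 1 ⊆ b := by
          intro x hx
          have hxb := PySem.List.mem_pyRange_one.1 hx
          have hk : x.toNat < a.length := by omega
          have hpmem : ((0 : Int) + (x.toNat : Int), a[x.toNat]) ∈ PySem.List.enumerate a 0 :=
            (PySem.List.mem_enumerate_iff a 0 _).2 ⟨x.toNat, hk, rfl⟩
          have hc := hchk _ hpmem
          have h0 : 0 ≤ a[x.toNat] := (hr _ hpmem).1
          rw [pvGetInt_nonneg b _ h0] at hc
          have : x ∈ b := by
            have hx' : ((0 : Int) + (x.toNat : Int)) = x := by omega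
            rw [hx'] at hc
            exact List.mem_of_getElem? hc
          exact this
        have hblen : b.length ≤ (PySem.List.pyRange 0 (a.length : Int) 1).length := by
          rw [PySem.List.length_pyRange_one]; omega
        exact ((List.subperm_of_subset (PySem.List.nodup_pyRange_one 0 _) hsub).perm_of_length_le hblen).symm
      rw [if_neg (not_not_intro ((pv_sorted_eq_range_iff b _).2 hPb))]
      rw [(pvChkLoop_iff b _).2 hchk]
      simp [hmain]
    · have hbeq : (b.map some == inv') = false := by simpa using hmain
      rw [hbeq]
      by_cases hsb : PySem.List.sorted b (fun x => x) false = PySem.List.pyRange 0 (a.length : Int) 1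
      · rw [if_neg (not_not_intro hsb)]
        cases hc : pvChkLoop b (PySem.List.enumerate a)
        · rfl
        · exact absurd (hiff.1 ((pvChkLoop_iff b _).1 hc)) hmain
      · rw [if_pos hsb]
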